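-- pv_equiv track=rewrite | github.com/leesky601/aimystery-chatbot | chatbots_backup.py | make_last_sentence_bold
-- ===== SOURCE A (Python) =====
-- def make_last_sentence_bold(text: str) -> str:
--     """마지막 문장을 볼드체로 변경"""
--     if not text or not text.strip():
--         return text
--
--     # 문장을 분리 (마침표, 느낌표, 물음표 기준)
--     sentences = []
--     current_sentence = ""
--
--     for char in text:
--         current_sentence += char
--         if char in '.!?':
--             sentences.append(current_sentence.strip())
--             current_sentence = ""
--
--     # 마지막에 남은 텍스트가 있으면 추가
--     if current_sentence.strip():
--         sentences.append(current_sentence.strip())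
--
--     if len(sentences) <= 1:
--         return text
--
--     # 마지막 문장을 볼드체로 변경
--     sentences[-1] = f"**{sentences[-1]}**"
--
--     return ' '.join(sentences)
-- ===== SOURCE B (Python) =====
-- def make_last_sentence_bold(text: str) -> str:
--     if not text or not text.strip():
--         return text
--     # cut the text at delimiter positions with slices instead of accumulating chars
--     sentences = []
--     start = 0
--     for i, c in enumerate(text):
--         if c in '.!?':
--             sentences.append(text[start:i + 1].strip())
--             start = i + 1
--     tail = text[start:].strip()
--     if tail:
--         sentences.append(tail)
--     if len(sentences) <= 1:
--         return text
--     return ' '.join(sentences[:-1]) + ' **' + sentences[-1] + '**'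
-- ===== Notes on version B (the rewrite author's own statement) =====
-- stated objective: alternative
-- what changed: Replaces A's per-character string accumulation with delimiter-position slicing: one enumerate pass records cut points and each sentence is taken as a stripped slice text[start:i+1], and the result is assembled by joining the initial sentences and appending the bold tail instead of mutating the list's last element.
import Mathlib
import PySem

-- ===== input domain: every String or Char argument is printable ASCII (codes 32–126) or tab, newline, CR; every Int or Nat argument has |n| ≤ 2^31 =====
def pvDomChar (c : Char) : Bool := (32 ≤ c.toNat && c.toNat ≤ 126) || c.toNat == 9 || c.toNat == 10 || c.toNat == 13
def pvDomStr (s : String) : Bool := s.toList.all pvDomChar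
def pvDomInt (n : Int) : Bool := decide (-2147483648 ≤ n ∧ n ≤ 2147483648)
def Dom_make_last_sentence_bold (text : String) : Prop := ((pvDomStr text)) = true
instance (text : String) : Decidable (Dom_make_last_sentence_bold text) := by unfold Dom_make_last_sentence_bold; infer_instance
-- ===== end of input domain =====

-- B replaces A's per-character sentence accumulation with slicing at delimiter positions
-- found in one enumerate pass, and appends the bolded last sentence instead of mutating
-- the list (objective: alternative decomposition, same cost).

-- ===== PORT A =====
-- A's loop body: grow the current sentence by one char; on a delimiter, flush its strip.
def pvStepA (st : List (List Char) × List Char) (c : Char) : List (List Char) × List Char :=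
  let cur := st.2 ++ [c]
  if c = '.' ∨ c = '!' ∨ c = '?' then (st.1 ++ [PySem.Chars.strip cur], [])
  else (st.1, cur)

def make_last_sentence_bold (text : String) : String :=
  if text = "" ∨ PySem.Str.strip text = "" then text
  else
    let st := text.toList.foldl pvStepA ([], [])
    let sentences := if PySem.Chars.strip st.2 ≠ [] then st.1 ++ [PySem.Chars.strip st.2] else st.1
    if sentences.length ≤ 1 then text
    else
      let sentences := sentences.dropLast ++ [('*' :: '*' :: (sentences.getLast?.getD [])) ++ ['*', '*']]
      String.ofList (PySem.Chars.join [' '] sentences)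

-- ===== PORT B =====
-- B's loop body: on a delimiter at index i, flush the stripped slice l[start:i+1].
def pvStepB (l : List Char) (st : List (List Char) × Int) (p : Int × Char) : List (List Char) × Int :=
  if p.2 = '.' ∨ p.2 = '!' ∨ p.2 = '?' then
    (st.1 ++ [PySem.Chars.strip (PySem.List.slice l (some st.2) (some (p.1 + 1)))], p.1 + 1)
  else st

def make_last_sentence_bold_alt (text : String) : String :=
  if text = "" ∨ PySem.Str.strip text = "" then text
  else
    let l := text.toList
    let st := (PySem.List.enumerate l).foldl (pvStepB l) ([], 0)
    let tail := PySem.Chars.strip (PySem.List.slice l (some st.2) none)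
    let sentences := if tail ≠ [] then st.1 ++ [tail] else st.1
    if sentences.length ≤ 1 then text
    else
      String.ofList (PySem.Chars.join [' '] sentences.dropLast ++
        (' ' :: '*' :: '*' :: (sentences.getLast?.getD [])) ++ ['*', '*'])

-- ===== PRECONDITION & SPEC =====
def Spec_make_last_sentence_bold (text : String) (out : String) : Prop := out = make_last_sentence_bold_alt text
instance (text : String) (out : String) : Decidable (Spec_make_last_sentence_bold text out) := by unfold Spec_make_last_sentence_bold; infer_instance

-- ===== CLAIM (what is proved, stated in full; the proofs are below) =====
def Claim_equal_make_last_sentence_bold : Prop := ∀ (text : String), Dom_make_last_sentence_bold text → Spec_make_last_sentence_bold text (make_last_sentence_bold text)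

-- ===== LEMMAS AND PROOFS =====

-- common spine: the sentence list both ports compute, as a recursion over the text
def pvSplit (cur : List Char) : List Char → List (List Char)
  | [] => if PySem.Chars.strip cur ≠ [] then [PySem.Chars.strip cur] else []
  | c :: t =>
      if c = '.' ∨ c = '!' ∨ c = '?' then PySem.Chars.strip (cur ++ [c]) :: pvSplit [] t
      else pvSplit (cur ++ [c]) t

theorem pvFoldA (l : List Char) (s : List (List Char)) (cur : List Char) :
    (let st := l.foldl pvStepA (s, cur);
     if PySem.Chars.strip st.2 ≠ [] then st.1 ++ [PySem.Chars.strip st.2] else st.1)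
      = s ++ pvSplit cur l := by
  induction l generalizing s cur with
  | nil =>
      simp only [List.foldl_nil, pvSplit]
      split <;> simp
  | cons c t ih =>
      simp only [List.foldl_cons, pvStepA, pvSplit]
      by_cases h : c = '.' ∨ c = '!' ∨ c = '?'
      · simp only [if_pos h]
        rw [ih]
        simp
      · simp only [if_neg h]
        exact ih _ _

theorem pvFoldB (suf : List Char) (pre : List Char) (s : List (List Char)) (start : Nat)
    (hst : start ≤ pre.length) :
    (let st := (PySem.List.enumerate suf (pre.length : Int)).foldl (pvStepB (pre ++ suf)) (s, (start : Int));
     let tail := PySem.Chars.strip (PySem.List.slice (pre ++ suf) (some st.2) none);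
     if tail ≠ [] then st.1 ++ [tail] else st.1)
      = s ++ pvSplit (pre.drop start) suf := by
  induction suf generalizing pre s start with
  | nil =>
      simp only [PySem.List.enumerate, List.foldl_nil, pvSplit]
      rw [PySem.List.slice_from_natCast]
      rw [List.drop_append_of_le_length hst]
      simp only [List.append_nil]
      split <;> simp
  | cons c t ih =>
      rw [PySem.List.enumerate_cons]
      simp only [List.foldl_cons, pvStepB, pvSplit]
      by_cases h : c = '.' ∨ c = '!' ∨ c = '?'
      · simp only [if_pos h]
        have h1 : ((pre.length : Int) + 1) = ((pre.length + 1 : Nat) : Int) := by push_cast; ring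
        have h2 : ((pre ++ [c]).length : Int) = ((pre.length + 1 : Nat) : Int) := by simp
        have hslice : PySem.List.slice (pre ++ c :: t) (some (start : Int)) (some ((pre.length : Int) + 1))
            = pre.drop start ++ [c] := by
          rw [h1, PySem.List.slice_natCast]
          rw [List.drop_append_of_le_length hst, List.take_append]
          have hlen : (pre.drop start).length = pre.length - start := by simp
          rw [List.take_of_length_le (by omega), hlen]
          have : pre.length + 1 - start - (pre.length - start) = 1 := by omega
          rw [this]
          simp
        have happ : pre ++ c :: t = (pre ++ [c]) ++ t := by simp
        rw [hslice]
        rw [h1, happ]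
        rw [show ((pre.length + 1 : Nat) : Int) = ((pre ++ [c]).length : Int) by simp]
        rw [ih (pre ++ [c]) (s ++ [PySem.Chars.strip (pre.drop start ++ [c])]) (pre ++ [c]).length (le_refl _)]
        simp
      · simp only [if_neg h]
        have happ : pre ++ c :: t = (pre ++ [c]) ++ t := by simp
        rw [happ]
        rw [show ((pre.length : Int) + 1) = (((pre ++ [c]).length : Nat) : Int) by simp]
        rw [ih (pre ++ [c]) s start (by simp; omega)]
        have : (pre ++ [c]).drop start = pre.drop start ++ [c] :=
          List.drop_append_of_le_length hst
        rw [this]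

-- join over an appended last element, when the front is nonempty
theorem pvJoinAppend (sep y : List Char) (xs : List (List Char)) (hx : xs ≠ []) :
    PySem.Chars.join sep (xs ++ [y]) = PySem.Chars.join sep xs ++ sep ++ y := by
  induction xs with
  | nil => exact absurd rfl hx
  | cons a rest ih =>
      cases rest with
      | nil => simp [PySem.Chars.join_cons_cons, PySem.Chars.join_singleton]
      | cons b r =>
          simp only [List.cons_append] at ih ⊢
          rw [PySem.Chars.join_cons_cons sep a b (r ++ [y]),
            PySem.Chars.join_cons_cons sep a b r, ih (by simp)]
          simp [List.append_assoc]

-- ===== VERDICT (by name: the statement is the Claim_ definition above) =====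
theorem make_last_sentence_bold_spec : Claim_equal_make_last_sentence_bold := by
  intro text _
  unfold Spec_make_last_sentence_bold make_last_sentence_bold make_last_sentence_bold_alt
  by_cases hg : text = "" ∨ PySem.Str.strip text = ""
  · simp [hg]
  · simp only [if_neg hg]
    have hA := pvFoldA text.toList [] []
    have hB := pvFoldB text.toList [] [] 0 (by simp)
    simp only [List.nil_append, List.drop_nil] at hA hB
    simp only [List.length_nil, Nat.cast_zero] at hB
    rw [hA, hB]
    set S := pvSplit [] text.toList with hS
    by_cases hlen : S.length ≤ 1
    · simp [hlen]
    · simp only [if_neg hlen]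
      have hfront : S.dropLast ≠ [] := by
        intro hnil
        have hld : S.dropLast.length = S.length - 1 := List.length_dropLast
        rw [hnil] at hld
        simp at hld
        omega
      rw [pvJoinAppend [' '] _ _ hfront]
      congr 1
      simp
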